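-- pv_equiv track=rewrite | github.com/Bohemianc/benchmarking | formatter.py | format_uri
-- ===== SOURCE A (Python) =====
-- ill_chars = '\/:*?"<>|,'
--
-- def format_uri(uri: str, is_pre: bool):
--     if "/" in uri:
--         uri = uri.split("/")[-1][:-1]
--     for ch in ill_chars:
--         uri = uri.replace(ch, "")
--     if not is_pre:
--         uri = '"' + uri + '"'
--     return uri
-- ===== SOURCE B (Python) =====
-- ill_chars = '\/:*?"<>|,'
--
-- def format_uri(uri: str, is_pre: bool):
--     # One forward pass: track the segment after the most recent '/'.
--     illegal = set(ill_chars)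
--     seg = []
--     seen_slash = False
--     for c in uri:
--         if c == '/':
--             seg = []
--             seen_slash = True
--         else:
--             seg.append(c)
--     if seen_slash:
--         seg = seg[:-1]
--     body = ''.join(c for c in seg if c not in illegal)
--     return body if is_pre else '"' + body + '"'
-- ===== Notes on version B (the rewrite author's own statement) =====
-- stated objective: alternative
-- what changed: Instead of split('/') plus ten full-string replace passes, B makes one forward pass tracking the segment after the most recent slash, then one filtering pass against a set of illegal characters.
import Mathlib
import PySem

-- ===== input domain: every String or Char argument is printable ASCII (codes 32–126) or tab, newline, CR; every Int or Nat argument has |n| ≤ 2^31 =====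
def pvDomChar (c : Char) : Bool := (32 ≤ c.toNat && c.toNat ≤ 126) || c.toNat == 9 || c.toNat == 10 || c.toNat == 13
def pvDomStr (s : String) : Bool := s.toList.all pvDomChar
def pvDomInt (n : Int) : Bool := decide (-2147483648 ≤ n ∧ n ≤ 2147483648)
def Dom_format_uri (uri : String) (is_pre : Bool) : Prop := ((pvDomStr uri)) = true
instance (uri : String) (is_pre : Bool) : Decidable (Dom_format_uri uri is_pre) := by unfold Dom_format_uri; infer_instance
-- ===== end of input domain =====

-- B replaces A's split('/')-then-ten-replace-passes pipeline by one forward pass that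
-- tracks the segment after the most recent slash, then one filtering pass over it.

-- ===== PORT A =====
def illChars : List Char := ['\\', '/', ':', '*', '?', '"', '<', '>', '|', ',']

def format_uri (uri : String) (is_pre : Bool) : String :=
  let uri1 := if PySem.Str.isIn "/" uri then
      -- uri.split("/")[-1][:-1]; split on a non-empty separator always returns a
      -- non-empty list, so [-1] is its last element
      PySem.Str.slice (((PySem.Str.split? uri "/").getD []).getLastD "") none (some (-1))
    else uri
  let uri2 := illChars.foldl (fun u ch => PySem.Str.replace u (String.ofList [ch]) "") uri1
  if !is_pre then "\"" ++ uri2 ++ "\"" else uri2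

-- ===== PORT B =====
def illegalSet : PySem.Set Char := PySem.Set.ofList ['\\', '/', ':', '*', '?', '"', '<', '>', '|', ',']

def format_uri_alt (uri : String) (is_pre : Bool) : String :=
  -- one pass: (current segment, seen_slash); '/' resets the segment
  let st := uri.toList.foldl
    (fun (p : List Char × Bool) c => if c = '/' then ([], true) else (p.1 ++ [c], p.2))
    ([], false)
  -- if seen_slash: seg = seg[:-1]
  let seg := if st.2 then PySem.List.slice st.1 none (some (-1)) else st.1
  let body := String.ofList (seg.filter (fun c => !(PySem.Set.contains illegalSet c)))
  if is_pre then body else "\"" ++ body ++ "\""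

-- ===== PRECONDITION & SPEC =====
def Spec_format_uri (uri : String) (is_pre : Bool) (out : String) : Prop := out = format_uri_alt uri is_pre
instance (uri : String) (is_pre : Bool) (out : String) : Decidable (Spec_format_uri uri is_pre out) := by unfold Spec_format_uri; infer_instance

-- ===== CLAIM (what is proved, stated in full; the proofs are below) =====
def Claim_equal_format_uri : Prop := ∀ (uri : String) (is_pre : Bool), Dom_format_uri uri is_pre → Spec_format_uri uri is_pre (format_uri uri is_pre)

-- ===== LEMMAS AND PROOFS =====

-- A's replace loop is the filter against illChars (same lemmas as before).
theorem replace_go_filter (c : Char) : ∀ (fuel : Nat) (l acc : List Char),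
    l.length ≤ fuel →
    PySem.Chars.replace.go [c] [] fuel l acc = acc.reverse ++ l.filter (fun x => x != c) := by
  intro fuel
  induction fuel with
  | zero =>
      intro l acc h
      have : l = [] := List.eq_nil_of_length_eq_zero (Nat.le_zero.mp h)
      subst this
      simp [PySem.Chars.replace.go]
  | succ n ih =>
      intro l acc h
      cases l with
      | nil => simp [PySem.Chars.replace.go]
      | cons x t =>
          rw [PySem.Chars.replace.go]
          by_cases hx : x = c
          · subst hx
            have hp : List.isPrefixOf [x] (x :: t) = true := by simp [List.isPrefixOf]
            simp only [hp, if_true, List.length, List.drop, List.reverse_nil, List.nil_append]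
            rw [ih t acc (by simpa using h)]
            simp
          · have hp : List.isPrefixOf [c] (x :: t) = false := by
              simp [List.isPrefixOf]
              exact fun hcx => absurd hcx.symm hx
            simp only [hp, Bool.false_eq_true, if_false]
            rw [ih t (x :: acc) (by simpa using h)]
            simp [hx]

theorem replace_single_filter (c : Char) (l : List Char) :
    PySem.Chars.replace l [c] [] = l.filter (fun x => x != c) := by
  rw [PySem.Chars.replace]
  rw [show ([c] : List Char).isEmpty = false from rfl]
  simpa using replace_go_filter c l.length l [] (le_refl _)

theorem foldl_replace_filter : ∀ (cs : List Char) (l : List Char),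
    cs.foldl (fun u ch => PySem.Chars.replace u [ch] []) l
      = l.filter (fun x => !(cs.contains x)) := by
  intro cs
  induction cs with
  | nil => intro l; simp
  | cons c cs ih =>
      intro l
      simp only [List.foldl_cons]
      rw [replace_single_filter, ih, List.filter_filter]
      apply List.filter_congr
      intro x _
      by_cases hx : x = c
      · subst hx; simp
      · simp [hx]

theorem str_foldl_replace (cs : List Char) (s : String) :
    (cs.foldl (fun u ch => PySem.Str.replace u (String.ofList [ch]) "") s).toList
      = cs.foldl (fun u ch => PySem.Chars.replace u [ch] []) s.toList := by
  induction cs generalizing s with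
  | nil => rfl
  | cons c cs ih =>
      simp only [List.foldl_cons]
      rw [ih]
      congr 1
      simp [PySem.Str.toList_replace]

theorem contains_illegalSet (x : Char) :
    PySem.Set.contains illegalSet x = illChars.contains x := by
  rw [show illegalSet = illChars from by decide]
  simp [PySem.Set.contains_eq_listContains]

-- segment step: the pure (segment-only) form of B's fold
def segStep (seg : List Char) (c : Char) : List Char := if c = '/' then [] else seg ++ [c]

theorem pair_fold_eq : ∀ (l : List Char) (seg : List Char) (b : Bool),
    l.foldl (fun (p : List Char × Bool) c => if c = '/' then ([], true) else (p.1 ++ [c], p.2)) (seg, b)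
      = (l.foldl segStep seg, b || l.contains '/') := by
  intro l
  induction l with
  | nil => intro seg b; simp
  | cons c t ih =>
      intro seg b
      by_cases hc : c = '/'
      · subst hc; simp [segStep, ih]
      · have h2 : ('/' = c) = False := eq_false (fun e => hc e.symm)
        simp [segStep, hc, ih, h2]

theorem fold_no_slash : ∀ (l : List Char) (seg : List Char), '/' ∉ l →
    l.foldl segStep seg = seg ++ l := by
  intro l
  induction l with
  | nil => intro seg _; simp
  | cons c t ih =>
      intro seg h
      have hc : c ≠ '/' := fun e => h (e ▸ List.mem_cons_self ..)
      have ht : '/' ∉ t := fun m => h (List.mem_cons_of_mem _ m)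
      simp [segStep, hc, ih _ ht]

-- a pure version of splitOn on separator ['/']
def splitPure : List Char → List Char → List (List Char)
  | [], cur => [cur.reverse]
  | c :: t, cur => if c = '/' then cur.reverse :: splitPure t [] else splitPure t (c :: cur)

theorem splitPure_ne_nil (l cur : List Char) : splitPure l cur ≠ [] := by
  induction l generalizing cur with
  | nil => simp [splitPure]
  | cons c t ih =>
      by_cases hc : c = '/' <;> simp [splitPure, hc, ih]

theorem go_eq_splitPure : ∀ (fuel : Nat) (l cur : List Char) (acc : List (List Char)),
    l.length ≤ fuel →
    PySem.Chars.splitOn.go ['/'] fuel l cur acc = acc.reverse ++ splitPure l cur := by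
  intro fuel
  induction fuel with
  | zero =>
      intro l cur acc h
      have : l = [] := List.eq_nil_of_length_eq_zero (Nat.le_zero.mp h)
      subst this
      rw [PySem.Chars.splitOn.go.eq_def]
      simp [splitPure]
  | succ n ih =>
      intro l cur acc h
      cases l with
      | nil =>
          rw [PySem.Chars.splitOn.go.eq_def]
          simp [splitPure]
      | cons c t =>
          rw [PySem.Chars.splitOn.go.eq_def]
          by_cases hc : c = '/'
          · subst hc
            have hp : List.isPrefixOf ['/'] ('/' :: t) = true := by simp [List.isPrefixOf]
            simp only [hp, if_true]
            rw [show List.drop (['/'] : List Char).length ('/' :: t) = t from rfl]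
            rw [ih t [] _ (by simpa using h)]
            simp [splitPure]
          · have hp : List.isPrefixOf ['/'] (c :: t) = false := by
              simp [List.isPrefixOf]
              exact fun e => absurd e.symm hc
            simp only [hp, Bool.false_eq_true, if_false]
            rw [ih t (c :: cur) acc (by simpa using h)]
            simp [splitPure, hc]

theorem splitOn_eq_splitPure (l : List Char) :
    PySem.Chars.splitOn l ['/'] = splitPure l [] := by
  rw [PySem.Chars.splitOn]
  simpa using go_eq_splitPure (l.length + 1) l [] [] (by omega)

theorem getLastD_default_irrel {α : Type} (l : List α) (h : l ≠ []) (d d' : α) :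
    l.getLastD d = l.getLastD d' := by
  rw [List.getLastD_eq_getLast?, List.getLastD_eq_getLast?]
  cases hl : l.getLast? with
  | none => exact absurd (List.getLast?_eq_none_iff.mp hl) h
  | some z => simp

theorem last_splitPure (d : List Char) : ∀ (l cur : List Char),
    (splitPure l cur).getLastD d = l.foldl segStep cur.reverse := by
  intro l
  induction l with
  | nil => intro cur; simp [splitPure]
  | cons c t ih =>
      intro cur
      by_cases hc : c = '/'
      · subst hc
        rw [show splitPure ('/' :: t) cur = cur.reverse :: splitPure t [] from by
              simp [splitPure]]
        simp only [List.foldl_cons]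
        rw [List.getLastD_cons, getLastD_default_irrel _ (splitPure_ne_nil t []) _ d, ih []]
        simp [segStep]
      · simp only [splitPure, if_neg hc, List.foldl_cons]
        rw [ih (c :: cur)]
        simp [segStep, hc]

-- '/' ∈ l ↔ isIn ['/'] on the character list
theorem isIn_slash_iff (l : List Char) :
    PySem.Chars.isIn ['/'] l = true ↔ '/' ∈ l := by
  rw [PySem.Chars.isIn_iff_infix]
  constructor
  · rintro ⟨s, t, rfl⟩; simp
  · intro h
    obtain ⟨s, t, rfl⟩ := List.append_of_mem h
    exact ⟨s, t, by simp⟩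

theorem str_isIn_slash (uri : String) :
    PySem.Str.isIn "/" uri = uri.toList.contains '/' := by
  have h1 : PySem.Str.isIn "/" uri = PySem.Chars.isIn ['/'] uri.toList := by
    simp [show ("/" : String).toList = ['/'] from rfl]
  rw [h1]
  by_cases hm : '/' ∈ uri.toList
  · rw [(isIn_slash_iff _).mpr hm]
    simpa using hm
  · cases hb : PySem.Chars.isIn ['/'] uri.toList with
    | false => simp [hm]
    | true => exact absurd ((isIn_slash_iff _).mp hb) hm

-- A's last split element, as a character list
theorem last_split_toList (uri : String) :
    (((PySem.Str.split? uri "/").getD []).getLastD "").toList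
      = (PySem.Chars.splitOn uri.toList ['/']).getLastD [] := by
  have h := PySem.Str.split?_map uri "/"
  rw [PySem.Chars.split?] at h
  rw [show ("/" : String).toList = ['/'] from rfl] at h
  rw [show (['/'] : List Char).isEmpty = false from rfl] at h
  simp only [Bool.false_eq_true, if_false] at h
  cases hs : PySem.Str.split? uri "/" with
  | none => rw [hs] at h; simp at h
  | some xs =>
      rw [hs] at h
      simp only [Option.map_some, Option.some_inj] at h
      rw [← h]
      simp only [Option.getD_some]
      have hxs : xs ≠ [] := by
        intro hnil
        subst hnil
        exact splitPure_ne_nil uri.toList [] (by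
          rw [← splitOn_eq_splitPure, ← h]; rfl)
      rw [List.getLastD_eq_getLast?, List.getLastD_eq_getLast?, List.getLast?_map]
      cases hl : xs.getLast? with
      | none => exact absurd (List.getLast?_eq_none_iff.mp hl) hxs
      | some z => simp

-- the middle (illegal-character removal) step, string level
theorem mid_eq (u1 : String) :
    illChars.foldl (fun u ch => PySem.Str.replace u (String.ofList [ch]) "") u1
      = String.ofList (u1.toList.filter (fun c => !(PySem.Set.contains illegalSet c))) := by
  have h : (illChars.foldl (fun u ch => PySem.Str.replace u (String.ofList [ch]) "") u1).toList
      = u1.toList.filter (fun c => !(PySem.Set.contains illegalSet c)) := by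
    rw [str_foldl_replace, foldl_replace_filter]
    apply List.filter_congr
    intro x _
    rw [contains_illegalSet]
  calc illChars.foldl (fun u ch => PySem.Str.replace u (String.ofList [ch]) "") u1
      = String.ofList (illChars.foldl (fun u ch => PySem.Str.replace u (String.ofList [ch]) "") u1).toList := by
        rw [String.ofList_toList]
    _ = String.ofList (u1.toList.filter (fun c => !(PySem.Set.contains illegalSet c))) := by rw [h]

-- ===== VERDICT (by name: the statement is the Claim_ definition above) =====
theorem format_uri_spec : Claim_equal_format_uri := by
  intro uri is_pre _
  unfold Spec_format_uri format_uri format_uri_alt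
  rw [pair_fold_eq]
  by_cases hin : '/' ∈ uri.toList
  · have hcontains : uri.toList.contains '/' = true := by simpa using hin
    have hIn : PySem.Str.isIn "/" uri = true := by rw [str_isIn_slash, hcontains]
    have hseg : (PySem.Str.slice (((PySem.Str.split? uri "/").getD []).getLastD "") none (some (-1))).toList
        = PySem.List.slice (uri.toList.foldl segStep []) none (some (-1)) := by
      rw [PySem.Str.slice_to_neg_one, last_split_toList, splitOn_eq_splitPure,
          last_splitPure, PySem.List.slice_to_neg_one]
      rfl
    simp only [hIn, if_true, hcontains, Bool.or_true, mid_eq, hseg]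
    cases is_pre <;> simp
  · have hcontains : uri.toList.contains '/' = false := by simpa using hin
    have hIn : PySem.Str.isIn "/" uri = false := by rw [str_isIn_slash, hcontains]
    simp only [hIn, Bool.false_eq_true, if_false, hcontains, Bool.or_false, mid_eq,
               fold_no_slash uri.toList [] hin, List.nil_append]
    cases is_pre <;> simp
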